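-- pv_equiv track=rewrite | github.com/redhat-et/vllm-cpu-perf-eval | automation/test-execution/ansible/filter_plugins/cpu_utils.py | cpu_list_to_range
-- ===== SOURCE A (Python) =====
-- from typing import List, Set, Dict, Optional, Union, Sequence
--
-- def cpu_list_to_range(cpu_list: Union[List[int], str]) -> str:
--     """
--     Convert a list of CPU IDs to a compact range string.
--     Args:
--         cpu_list: List of integers or comma-separated string
--     Returns:
--         String with CPU ranges (e.g., "0-3,8-11,16")
--     Examples:
--         [0,1,2,3,8,9,10,11,16] -> "0-3,8-11,16"
--         "0,1,2,3,8,9,10,11,16" -> "0-3,8-11,16"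
--     """
--     if not cpu_list:
--         return ""
--
--     # Handle string input (comma-separated)
--     if isinstance(cpu_list, str):
--         if not cpu_list.strip():
--             return ""
--         try:
--             cpu_list = [
--                 int(x.strip())
--                 for x in cpu_list.split(',')
--                 if x.strip()
--             ]
--         except ValueError as e:
--             raise AnsibleFilterError(
--                 f"Invalid CPU ID in string '{cpu_list}': {e}"
--             )
--
--     if not isinstance(cpu_list, list):
--         raise AnsibleFilterError(
--             f"cpu_list_to_range expects list or string, got {type(cpu_list).__name__}"
--         )
--
--     if not cpu_list:
--         return ""
--     # Convert to sorted list of unique integers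
--     try:
--         cpus = sorted(set(int(cpu) for cpu in cpu_list))
--     except (ValueError, TypeError) as e:
--         raise AnsibleFilterError(
--             f"Invalid CPU list format - expected integers: {e}"
--         )
--
--     if not cpus:
--         return ""
--     # Build ranges
--     ranges = []
--     start = cpus[0]
--     prev = cpus[0]
--     for cpu in cpus[1:]:
--         if cpu == prev + 1:
--             prev = cpu
--         else:
--             ranges.append(_format_range(start, prev))
--             start = cpu
--             prev = cpu
--     # Add final range
--     ranges.append(_format_range(start, prev))
--     return ','.join(ranges)
--
-- def _format_range(start: int, end: int) -> str:
--     """Format a single CPU range."""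
--     return str(start) if start == end else f"{start}-{end}"
-- ===== SOURCE B (Python) =====
-- def cpu_list_to_range(cpu_list):
--     if not cpu_list:
--         return ""
--
--     # Handle string input (comma-separated) -- identical to the original
--     if isinstance(cpu_list, str):
--         if not cpu_list.strip():
--             return ""
--         try:
--             cpu_list = [
--                 int(x.strip())
--                 for x in cpu_list.split(',')
--                 if x.strip()
--             ]
--         except ValueError as e:
--             raise AnsibleFilterError(
--                 f"Invalid CPU ID in string '{cpu_list}': {e}"
--             )
--
--     if not isinstance(cpu_list, list):
--         raise AnsibleFilterError(
--             f"cpu_list_to_range expects list or string, got {type(cpu_list).__name__}"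
--         )
--
--     if not cpu_list:
--         return ""
--     try:
--         cpus = sorted(set(int(cpu) for cpu in cpu_list))
--     except (ValueError, TypeError) as e:
--         raise AnsibleFilterError(
--             f"Invalid CPU list format - expected integers: {e}"
--         )
--
--     if not cpus:
--         return ""
--     # Declarative staged construction instead of a stateful scan:
--     # a "break" sits between adjacent non-consecutive values; range starts
--     # are cpus[0] plus the value after each break, range ends are the value
--     # before each break plus cpus[-1]; pair them up positionally.
--     breaks = [(a, b) for a, b in zip(cpus, cpus[1:]) if b != a + 1]
--     starts = [cpus[0]] + [b for _, b in breaks]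
--     ends = [a for a, _ in breaks] + [cpus[-1]]
--     return ",".join(
--         str(s) if s == e else f"{s}-{e}" for s, e in zip(starts, ends)
--     )
-- ===== Notes on version B (the rewrite author's own statement) =====
-- stated objective: alternative
-- what changed: A's stateful start/prev accumulator scan is replaced by a declarative staged construction: filter the adjacent-pair zip for non-consecutive breaks, derive the starts and ends lists from those breaks, and zip-format them positionally; parsing and validation are unchanged.
import Mathlib
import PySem

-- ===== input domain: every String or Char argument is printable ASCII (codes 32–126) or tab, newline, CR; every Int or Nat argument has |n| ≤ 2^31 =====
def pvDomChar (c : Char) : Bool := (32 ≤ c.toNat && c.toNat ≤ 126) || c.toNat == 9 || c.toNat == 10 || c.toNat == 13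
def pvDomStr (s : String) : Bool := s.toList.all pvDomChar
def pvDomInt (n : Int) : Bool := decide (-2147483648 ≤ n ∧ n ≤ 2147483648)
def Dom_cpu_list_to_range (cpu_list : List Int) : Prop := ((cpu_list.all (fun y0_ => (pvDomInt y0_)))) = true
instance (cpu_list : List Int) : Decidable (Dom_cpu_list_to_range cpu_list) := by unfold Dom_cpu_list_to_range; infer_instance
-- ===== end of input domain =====

-- B replaces A's stateful start/prev scan by a staged declarative construction (filter adjacent-pair
-- breaks, derive the starts/ends lists, zip-format); same cost, different decomposition ("alternative").
-- The Python's string-input parsing is unreachable for a List Int argument and does not appear in the ports.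

-- ===== PORT A =====
-- _format_range(start, end)
def pvFmtRange (start e : Int) : String :=
  if start = e then PySem.Int.toStr start
  else PySem.Int.toStr start ++ "-" ++ PySem.Int.toStr e

-- the body of A's 'for cpu in cpus[1:]' loop, state = (ranges, start, prev)
def pvStepA (s : List String × Int × Int) (cpu : Int) : List String × Int × Int :=
  if cpu = s.2.2 + 1 then (s.1, s.2.1, cpu)
  else (s.1 ++ [pvFmtRange s.2.1 s.2.2], cpu, cpu)

def cpu_list_to_range (cpu_list : List Int) : String :=
  if cpu_list = [] then ""
  else
    -- int(cpu) on an int is the identity; sorted(set(...))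
    let cpus := PySem.List.sorted (PySem.Set.ofList cpu_list) (fun x => x) false
    if cpus = [] then ""
    else
      -- cpus[0] is in range here (cpus ≠ []), so getD is exact
      let start := cpus.getD 0 0
      let st := (PySem.List.slice cpus (some 1) none).foldl pvStepA ([], start, start)
      PySem.Str.join "," (st.1 ++ [pvFmtRange st.2.1 st.2.2])

-- ===== PORT B =====
-- B's inline 'str(s) if s == e else f"{s}-{e}"'
def pvFmtB (s e : Int) : String :=
  if s = e then PySem.Int.toStr s
  else PySem.Int.toStr s ++ "-" ++ PySem.Int.toStr e

def cpu_list_to_range_alt (cpu_list : List Int) : String :=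
  if cpu_list = [] then ""
  else
    let cpus := PySem.List.sorted (PySem.Set.ofList cpu_list) (fun x => x) false
    if cpus = [] then ""
    else
      -- zip(cpus, cpus[1:]) filtered for breaks
      let breaks := (cpus.zip (PySem.List.slice cpus (some 1) none)).filter
        (fun p => !(p.2 == p.1 + 1))
      -- cpus[0] and cpus[-1] are in range here (cpus ≠ []), so getD is exact
      let starts := cpus.getD 0 0 :: breaks.map (fun p => p.2)
      let ends := breaks.map (fun p => p.1) ++ [cpus.getD (cpus.length - 1) 0]
      PySem.Str.join "," (List.zipWith pvFmtB starts ends)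

-- ===== PRECONDITION & SPEC =====
def Spec_cpu_list_to_range (cpu_list : List Int) (out : String) : Prop := out = cpu_list_to_range_alt cpu_list
instance (cpu_list : List Int) (out : String) : Decidable (Spec_cpu_list_to_range cpu_list out) := by unfold Spec_cpu_list_to_range; infer_instance

-- ===== CLAIM (what is proved, stated in full; the proofs are below) =====
def Claim_equal_cpu_list_to_range : Prop := ∀ (cpu_list : List Int), Dom_cpu_list_to_range cpu_list → Spec_cpu_list_to_range cpu_list (cpu_list_to_range cpu_list)

-- ===== LEMMAS AND PROOFS =====

-- abstract run-splitting: the parts A's loop emits, values only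
def pvG (start prev : Int) : List Int → List String
  | [] => [pvFmtRange start prev]
  | c :: t => if c = prev + 1 then pvG start c t else pvFmtRange start prev :: pvG c c t

-- A's fold, characterised: emit(fold over rest from (ranges,start,prev)) = ranges ++ pvG start prev rest
theorem pvFoldA_char (rest : List Int) : ∀ (ranges : List String) (start prev : Int),
    (let st := rest.foldl pvStepA (ranges, start, prev); st.1 ++ [pvFmtRange st.2.1 st.2.2])
      = ranges ++ pvG start prev rest := by
  induction rest with
  | nil => intro ranges start prev; simp [pvG]
  | cons c t ih =>
    intro ranges start prev
    simp only [List.foldl_cons, pvStepA, pvG]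
    by_cases h : c = prev + 1
    · simp [h, ih]
    · simp [h, ih, List.append_assoc]

-- B's breaks list on prev :: rest
def pvBreaks (l : List Int) : List (Int × Int) :=
  (l.zip (l.drop 1)).filter (fun p => !(p.2 == p.1 + 1))

-- B's staged construction equals A's run-splitting, for ANY rest (no sortedness needed)
theorem pvB_char (rest : List Int) : ∀ (start prev : Int),
    List.zipWith pvFmtB (start :: (pvBreaks (prev :: rest)).map (fun p => p.2))
      ((pvBreaks (prev :: rest)).map (fun p => p.1) ++
        [(prev :: rest).getD rest.length 0])
    = pvG start prev rest := by
  induction rest with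
  | nil => intro start prev; simp [pvBreaks, pvG, pvFmtB, pvFmtRange]
  | cons c t ih =>
    intro start prev
    have hz : pvBreaks (prev :: c :: t)
        = ((prev, c) :: ((c :: t).zip t)).filter (fun p => !(p.2 == p.1 + 1)) := by
      simp [pvBreaks]
    by_cases h : c = prev + 1
    · rw [pvG, if_pos h]
      rw [show (prev :: c :: t).getD (c :: t).length 0 = (c :: t).getD t.length 0 from rfl]
      rw [← ih start c]
      congr 2 <;> · rw [hz]; simp [pvBreaks, h, List.filter]
    · rw [pvG, if_neg h]
      have hb : pvBreaks (prev :: c :: t) = (prev, c) :: pvBreaks (c :: t) := by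
        rw [hz]; simp only [pvBreaks, List.drop_one, List.tail_cons, List.filter,
          show (c == prev + 1) = false from by simp [h], Bool.not_false]
      rw [hb]
      simp only [List.map_cons, List.cons_append, List.zipWith_cons_cons]
      rw [show (prev :: c :: t).getD (c :: t).length 0 = (c :: t).getD t.length 0 from rfl]
      rw [ih c c]
      congr 1

-- ===== VERDICT (by name: the statement is the Claim_ definition above) =====
theorem cpu_list_to_range_spec : Claim_equal_cpu_list_to_range := by
  unfold Claim_equal_cpu_list_to_range
  intro cpu_list _
  unfold Spec_cpu_list_to_range cpu_list_to_range cpu_list_to_range_alt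
  by_cases h0 : cpu_list = []
  · simp [h0]
  · simp only [h0, if_false]
    set cpus := PySem.List.sorted (PySem.Set.ofList cpu_list) (fun x => x) false with hc
    by_cases h1 : cpus = []
    · simp [h1]
    · simp only [h1, if_false]
      have hslice : PySem.List.slice cpus (some 1) none = cpus.drop 1 := by
        simpa using PySem.List.slice_from cpus (show (0:Int) ≤ 1 by omega)
      obtain ⟨a, t, ht⟩ := List.exists_cons_of_ne_nil h1
      rw [hslice, ht]
      congr 1
      rw [pvFoldA_char (List.drop 1 (a :: t)) [] ((a :: t).getD 0 0) ((a :: t).getD 0 0)]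
      simp only [List.nil_append, List.drop_one, List.tail_cons, List.getD_cons_zero]
      rw [← pvB_char t a a]
      rfl
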